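-- pv_equiv track=rewrite | github.com/giullianomartinez/fundamentos-algoritmos | bonificacionC3.py | calcularMaximoGastado
-- ===== SOURCE A (Python) =====
-- def calcularMaximoGastado(listaSocios):
--     maximo = listaSocios[0][3]
--     listaMaximo = []
--
--     for tuplas in listaSocios:
--         if tuplas[3] > maximo:
--             maximo = tuplas[3]
--
--     for tuplas in listaSocios:
--         if tuplas[3] == maximo:
--             listaMaximo.append(tuplas[0])
--
--     return maximo, listaMaximo
-- ===== SOURCE B (Python) =====
-- def calcularMaximoGastado(listaSocios):
--     gastos = sorted(tupla[3] for tupla in listaSocios)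
--     maximo = gastos[-1]
--     listaMaximo = [tupla[0] for tupla in listaSocios if tupla[3] == maximo]
--     return maximo, listaMaximo
-- ===== Notes on version B (the rewrite author's own statement) =====
-- stated objective: simpler
-- what changed: Replaced A's hand-written running-max loop and append loop with sorting the spends and taking the last element, plus a list comprehension collecting the names that reach it.
import Mathlib
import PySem

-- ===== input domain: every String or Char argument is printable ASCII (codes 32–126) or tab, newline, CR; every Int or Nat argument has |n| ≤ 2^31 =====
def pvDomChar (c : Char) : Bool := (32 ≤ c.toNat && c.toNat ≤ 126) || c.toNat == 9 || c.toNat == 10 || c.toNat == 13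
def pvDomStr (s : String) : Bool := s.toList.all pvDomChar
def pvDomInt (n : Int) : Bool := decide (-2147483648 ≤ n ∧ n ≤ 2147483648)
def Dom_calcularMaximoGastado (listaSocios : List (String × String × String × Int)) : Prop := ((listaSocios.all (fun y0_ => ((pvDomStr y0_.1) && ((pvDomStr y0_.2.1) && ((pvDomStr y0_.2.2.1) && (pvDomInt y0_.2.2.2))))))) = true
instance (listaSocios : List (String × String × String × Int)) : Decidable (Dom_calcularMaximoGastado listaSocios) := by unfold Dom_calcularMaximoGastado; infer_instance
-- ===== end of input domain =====

-- B replaces A's two hand-written loops by sorting the spends and taking the last element,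
-- then a comprehension collecting the matching names (simpler; return value only, no mutation).

-- ===== PORT A =====
def calcularMaximoGastado (listaSocios : List (String × String × String × Int)) : Int × List String :=
  match listaSocios with
  | [] => (0, [])  -- unreachable under Pre_: Python raises IndexError here
  | h :: _ =>
    let maximo := listaSocios.foldl (fun m t => if t.2.2.2 > m then t.2.2.2 else m) h.2.2.2
    let listaMaximo := listaSocios.foldl (fun acc t => if t.2.2.2 == maximo then acc ++ [t.1] else acc) []
    (maximo, listaMaximo)

-- ===== PORT B =====
def calcularMaximoGastado_alt (listaSocios : List (String × String × String × Int)) : Int × List String :=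
  let gastos := PySem.List.sorted (listaSocios.map (fun tupla => tupla.2.2.2)) (fun x => x) false
  let maximo := PySem.List.pyGetD gastos (-1) 0   -- gastos[-1]; unreachable default: Python raises IndexError on []
  let listaMaximo := (listaSocios.filter (fun tupla => tupla.2.2.2 == maximo)).map (fun tupla => tupla.1)
  (maximo, listaMaximo)

-- ===== PRECONDITION & SPEC =====
-- Pre_ excludes only the empty list, on which Python A raises IndexError (listaSocios[0]).
def Pre_calcularMaximoGastado (listaSocios : List (String × String × String × Int)) : Prop := listaSocios ≠ []
instance (listaSocios : List (String × String × String × Int)) : Decidable (Pre_calcularMaximoGastado listaSocios) := by unfold Pre_calcularMaximoGastado; infer_instance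
def pvWitness_calcularMaximoGastado : (List (String × String × String × Int)) := [("a", "b", "c", 1)]
def Spec_calcularMaximoGastado (listaSocios : List (String × String × String × Int)) (out : Int × List String) : Prop := out = calcularMaximoGastado_alt listaSocios
instance (listaSocios : List (String × String × String × Int)) (out : Int × List String) : Decidable (Spec_calcularMaximoGastado listaSocios out) := by unfold Spec_calcularMaximoGastado; infer_instance

-- ===== CLAIM (what is proved, stated in full; the proofs are below) =====
def Claim_equal_calcularMaximoGastado : Prop := ∀ (listaSocios : List (String × String × String × Int)), Dom_calcularMaximoGastado listaSocios → Pre_calcularMaximoGastado listaSocios → Spec_calcularMaximoGastado listaSocios (calcularMaximoGastado listaSocios)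

-- ===== LEMMAS AND PROOFS =====

-- in a ≤-sorted (Pairwise) list the last element dominates every element
theorem pv_le_getLast {xs : List Int} (hp : xs.Pairwise (· ≤ ·)) (hne : xs ≠ []) :
    ∀ y ∈ xs, y ≤ xs.getLast hne := by
  induction xs with
  | nil => simp at hne
  | cons a t ih =>
    intro y hy
    rcases List.mem_cons.mp hy with rfl | hyt
    · cases t with
      | nil => simp
      | cons b u =>
        have hab : y ≤ b := (List.pairwise_cons.mp hp).1 b (by simp)
        have := ih (List.pairwise_cons.mp hp).2 (by simp) b (by simp)
        simpa [List.getLast] using le_trans hab this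
    · cases t with
      | nil => simp at hyt
      | cons b u =>
        have := ih (List.pairwise_cons.mp hp).2 (by simp) y hyt
        simpa [List.getLast] using this

-- A's running-max step is Int.max
theorem pv_step_eq_max (m v : Int) : (if v > m then v else m) = max m v := by
  rw [max_def]; split_ifs <;> omega

-- the two maxima coincide on a non-empty list
theorem pv_max_eq (h : String × String × String × Int) (t : List (String × String × String × Int)) :
    (h :: t).foldl (fun m t => if t.2.2.2 > m then t.2.2.2 else m) h.2.2.2 =
      PySem.List.pyGetD (PySem.List.sorted ((h :: t).map (fun tupla => tupla.2.2.2)) (fun x => x) false) (-1) 0 := by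
  set ts : List Int := t.map (fun tupla => tupla.2.2.2) with hts
  set vs : List Int := h.2.2.2 :: ts with hvs
  have hmap : (h :: t).map (fun tupla => tupla.2.2.2) = vs := by simp [hvs, hts]
  rw [hmap]
  have hsne : PySem.List.sorted vs (fun x => x) false ≠ [] := by
    rw [Ne, PySem.List.sorted_eq_nil_iff]; simp [hvs]
  rw [PySem.List.pyGetD_neg_one _ _ hsne]
  -- A's fold equals the running max over the value list
  have hfun : (fun (m : Int) (tupla : String × String × String × Int) =>
      if tupla.2.2.2 > m then tupla.2.2.2 else m) = (fun m tupla => max m tupla.2.2.2) := by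
    funext m tupla; exact pv_step_eq_max m tupla.2.2.2
  have hfold : (h :: t).foldl (fun m t => if t.2.2.2 > m then t.2.2.2 else m) h.2.2.2
      = ts.foldl max h.2.2.2 := by
    rw [hfun]; simp [hts, List.foldl_map]
  rw [hfold]
  set M := ts.foldl max h.2.2.2 with hM
  set L := (PySem.List.sorted vs (fun x => x) false).getLast hsne with hL
  have hLmem : L ∈ vs := by
    have hm := List.getLast_mem hsne
    rw [PySem.List.mem_sorted] at hm
    exact hL ▸ hm
  have hMmem : M ∈ vs := by
    rcases PySem.List.foldl_max_mem ts h.2.2.2 with hc | hc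
    · rw [hM, hc, hvs]; exact List.mem_cons_self
    · rw [hvs]; exact List.mem_cons_of_mem _ (hM ▸ hc)
  -- L ≤ M : everything in vs is ≤ the running max
  have hLleM : L ≤ M := by
    rcases List.mem_cons.mp (hvs ▸ hLmem) with hc | hc
    · exact hc ▸ (PySem.List.le_foldl_max ts h.2.2.2).1
    · exact (PySem.List.le_foldl_max ts h.2.2.2).2 L hc
  -- M ≤ L : the last element of the sorted list dominates
  have hMleL : M ≤ L := by
    have hp : (PySem.List.sorted vs (fun x => x) false).Pairwise (· ≤ ·) := by
      simpa using PySem.List.sorted_pairwise vs (fun x => x)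
    exact pv_le_getLast hp hsne M (by rw [PySem.List.mem_sorted]; exact hMmem)
  omega

-- ===== VERDICT (by name: the statement is the Claim_ definition above) =====
theorem calcularMaximoGastado_spec : Claim_equal_calcularMaximoGastado := by
  intro l _ hpre
  unfold Spec_calcularMaximoGastado
  match l with
  | [] => exact absurd rfl hpre
  | h :: t =>
    simp only [calcularMaximoGastado, calcularMaximoGastado_alt]
    rw [PySem.List.foldl_append_if, ← pv_max_eq h t]
    simp
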